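-- pv_equiv track=rewrite | github.com/AliZareh-CoE/Unet | data.py | _boran_parse_probe_region
-- ===== SOURCE A (Python) =====
-- BORAN_PROBE_REGION_MAP = {
--     "AH":  "hippocampus",       # Anterior Hippocampus
--     "PH":  "hippocampus",       # Posterior Hippocampus
--     "EC":  "entorhinal_cortex", # Entorhinal Cortex
--     "AL":  "amygdala",          # Amygdala Left
--     "AR":  "amygdala",          # Amygdala Right
--     "A":   "amygdala",          # Amygdala (generic)
--     "TB":  "other",             # Temporal basal
--     "PHC": "other",             # Parahippocampal
--     "DR":  "other",             # Non-MTL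
--     "LR":  "other",             # Non-MTL
-- }
--
-- def _boran_parse_probe_region(prefix: str) -> str:
--     """Parse a probe abbreviation to canonical region name."""
--     prefix = prefix.upper().strip()
--     if prefix in BORAN_PROBE_REGION_MAP:
--         return BORAN_PROBE_REGION_MAP[prefix]
--     for pfx in sorted(BORAN_PROBE_REGION_MAP.keys(), key=len, reverse=True):
--         if prefix.startswith(pfx):
--             return BORAN_PROBE_REGION_MAP[pfx]
--     return "unknown"
-- ===== SOURCE B (Python) =====
-- BORAN_PROBE_REGION_MAP = {
--     "AH":  "hippocampus",       # Anterior Hippocampus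
--     "PH":  "hippocampus",       # Posterior Hippocampus
--     "EC":  "entorhinal_cortex", # Entorhinal Cortex
--     "AL":  "amygdala",          # Amygdala Left
--     "AR":  "amygdala",          # Amygdala Right
--     "A":   "amygdala",          # Amygdala (generic)
--     "TB":  "other",             # Temporal basal
--     "PHC": "other",             # Parahippocampal
--     "DR":  "other",             # Non-MTL
--     "LR":  "other",             # Non-MTL
-- }
--
-- _BORAN_MAX_PREFIX_LEN = max(map(len, BORAN_PROBE_REGION_MAP))
--
-- def _boran_parse_probe_region(prefix: str) -> str:
--     """Parse a probe abbreviation to canonical region name."""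
--     prefix = prefix.upper().strip()
--     L = min(len(prefix), _BORAN_MAX_PREFIX_LEN)
--     while L > 0:
--         region = BORAN_PROBE_REGION_MAP.get(prefix[:L])
--         if region is not None:
--             return region
--         L -= 1
--     return "unknown"
-- ===== Notes on version B (the rewrite author's own statement) =====
-- stated objective: simpler
-- what changed: Instead of scanning the dictionary keys sorted by length with startswith (plus a redundant exact-match branch), B walks candidate prefixes of the input from the longest key length down and does a direct dict lookup on each, returning the first hit.
import Mathlib
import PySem

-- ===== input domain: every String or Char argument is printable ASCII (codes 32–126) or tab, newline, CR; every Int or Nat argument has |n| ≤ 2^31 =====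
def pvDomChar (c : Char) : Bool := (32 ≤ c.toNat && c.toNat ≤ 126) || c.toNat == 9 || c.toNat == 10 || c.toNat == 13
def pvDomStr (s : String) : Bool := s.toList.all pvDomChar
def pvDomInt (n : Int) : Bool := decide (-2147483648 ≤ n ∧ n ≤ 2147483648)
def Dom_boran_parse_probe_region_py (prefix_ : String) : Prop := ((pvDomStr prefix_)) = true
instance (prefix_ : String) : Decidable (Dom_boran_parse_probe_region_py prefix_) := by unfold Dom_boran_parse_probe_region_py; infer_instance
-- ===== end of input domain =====

-- B replaces A's scan of the length-sorted key list with startswith (and its redundant exact-match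
-- branch) by direct dict lookups on the candidate prefixes of the input, longest first (objective: simpler).

-- ===== PORT A =====
-- module-level constant BORAN_PROBE_REGION_MAP (shared context for both ports)
def boranMap : PySem.Dict String String :=
  PySem.Dict.ofList [("AH","hippocampus"),("PH","hippocampus"),("EC","entorhinal_cortex"),
    ("AL","amygdala"),("AR","amygdala"),("A","amygdala"),("TB","other"),("PHC","other"),
    ("DR","other"),("LR","other")]

-- the 'for pfx in sorted(...)' loop of A (lookup of the present key pfx ported total via getD)
def boranFind (p : String) : List String → String
  | [] => "unknown"
  | k :: rest => if PySem.Str.startswith p k then (boranMap.get? k).getD "" else boranFind p rest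

def boran_parse_probe_region_py (prefix_ : String) : String :=
  let p := PySem.Str.strip (PySem.Str.upper prefix_)
  if boranMap.contains p then (boranMap.get? p).getD ""
  else boranFind p (PySem.List.sorted boranMap.keys (fun k => PySem.Str.len k) true)

-- ===== PORT B =====
-- max(map(len, BORAN_PROBE_REGION_MAP)); Python max raises on an empty iterable, ported total
-- via a 0 default — the argument here is a non-empty literal, so the default is never taken
def boranMaxPrefixLen : Int :=
  match PySem.List.max? (boranMap.keys.map PySem.Str.len) (fun v => v) with
  | some v => v
  | none => 0

-- B's 'while L > 0' loop: L counts down, candidate prefix_[:L] looked up directly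
def boranLookup (p : String) : Nat → String
  | 0 => "unknown"
  | L + 1 =>
    match boranMap.get? (PySem.Str.slice p none (some ((L : Int) + 1))) with
    | some region => region
    | none => boranLookup p L

def boran_parse_probe_region_py_alt (prefix_ : String) : String :=
  let p := PySem.Str.strip (PySem.Str.upper prefix_)
  boranLookup p (min (PySem.Str.len p) boranMaxPrefixLen).toNat

-- ===== PRECONDITION & SPEC =====
def Spec_boran_parse_probe_region_py (prefix_ : String) (out : String) : Prop := out = boran_parse_probe_region_py_alt prefix_
instance (prefix_ : String) (out : String) : Decidable (Spec_boran_parse_probe_region_py prefix_ out) := by unfold Spec_boran_parse_probe_region_py; infer_instance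

-- ===== CLAIM (what is proved, stated in full; the proofs are below) =====
def Claim_equal_boran_parse_probe_region_py : Prop := ∀ (prefix_ : String), Dom_boran_parse_probe_region_py prefix_ → Spec_boran_parse_probe_region_py prefix_ (boran_parse_probe_region_py prefix_)

-- ===== LEMMAS AND PROOFS =====
theorem get?_boranMap (l : List Char) : boranMap.get? (String.ofList l) =
    if ['A','H'] = l then some "hippocampus" else
    if ['P','H'] = l then some "hippocampus" else
    if ['E','C'] = l then some "entorhinal_cortex" else
    if ['A','L'] = l then some "amygdala" else
    if ['A','R'] = l then some "amygdala" else
    if ['A'] = l then some "amygdala" else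
    if ['T','B'] = l then some "other" else
    if ['P','H','C'] = l then some "other" else
    if ['D','R'] = l then some "other" else
    if ['L','R'] = l then some "other" else none := by
  rw [show boranMap = PySem.Dict.mk [("AH","hippocampus"),("PH","hippocampus"),("EC","entorhinal_cortex"),
    ("AL","amygdala"),("AR","amygdala"),("A","amygdala"),("TB","other"),("PHC","other"),
    ("DR","other"),("LR","other")] from rfl]
  simp only [PySem.Dict.get?_mk_cons,
    show ("AH":String) = String.ofList ['A','H'] from rfl,
    show ("PH":String) = String.ofList ['P','H'] from rfl,
    show ("EC":String) = String.ofList ['E','C'] from rfl,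
    show ("AL":String) = String.ofList ['A','L'] from rfl,
    show ("AR":String) = String.ofList ['A','R'] from rfl,
    show ("A":String) = String.ofList ['A'] from rfl,
    show ("TB":String) = String.ofList ['T','B'] from rfl,
    show ("PHC":String) = String.ofList ['P','H','C'] from rfl,
    show ("DR":String) = String.ofList ['D','R'] from rfl,
    show ("LR":String) = String.ofList ['L','R'] from rfl,
    beq_iff_eq, String.ofList_inj]
  rfl

theorem slice_ofList (l : List Char) (n : Nat) :
    PySem.Str.slice (String.ofList l) none (some (n : Int)) = String.ofList (l.take n) := by
  conv_lhs => rw [← String.ofList_toList (s := PySem.Str.slice (String.ofList l) none (some (n : Int)))]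
  rw [PySem.Str.toList_slice, PySem.Chars.slice_eq_listSlice, String.toList_ofList,
    PySem.List.slice_to_natCast]

theorem boranLookup_succ (p : String) (L : Nat) : boranLookup p (L+1) =
    (match boranMap.get? (PySem.Str.slice p none (some ((L : Int) + 1))) with
     | some region => region
     | none => boranLookup p L) := rfl

theorem sortedKeys_eq : PySem.List.sorted boranMap.keys (fun k => PySem.Str.len k) true =
    ["PHC","AH","PH","EC","AL","AR","TB","DR","LR","A"] := by decide

set_option maxHeartbeats 1000000 in
theorem boranCore_eq : ∀ s : String, boran_parse_probe_region_py s = boran_parse_probe_region_py_alt s := by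
  intro s
  unfold boran_parse_probe_region_py boran_parse_probe_region_py_alt
  rw [sortedKeys_eq]
  generalize (PySem.Str.strip (PySem.Str.upper s)) = q
  rw [← String.ofList_toList (s := q)]
  generalize q.toList = l
  rw [show boranMaxPrefixLen = (3:Int) from rfl]
  simp only [PySem.Str.len_eq, String.toList_ofList]
  rcases l with _ | ⟨c1, _ | ⟨c2, _ | ⟨c3, rest⟩⟩⟩
  · decide
  · -- [c1]
    rw [show (min (([c1] : List Char).length : Int) 3).toNat = 0+1 from rfl]
    rw [boranLookup_succ, show ((0:Nat):Int)+1 = ((1:Nat):Int) from rfl, slice_ofList]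
    rw [PySem.Dict.contains_eq_isSome_get?]
    simp only [List.take_succ_cons, List.take_nil, List.take_zero, get?_boranMap, boranFind,
      PySem.Str.startswith_eq, String.toList_ofList,
      show ("AH":String) = String.ofList ['A','H'] from rfl,
      show ("PH":String) = String.ofList ['P','H'] from rfl,
      show ("EC":String) = String.ofList ['E','C'] from rfl,
      show ("AL":String) = String.ofList ['A','L'] from rfl,
      show ("AR":String) = String.ofList ['A','R'] from rfl,
      show ("A":String) = String.ofList ['A'] from rfl,
      show ("TB":String) = String.ofList ['T','B'] from rfl,
      show ("PHC":String) = String.ofList ['P','H','C'] from rfl,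
      show ("DR":String) = String.ofList ['D','R'] from rfl,
      show ("LR":String) = String.ofList ['L','R'] from rfl,
      PySem.Chars.startswith_iff]
    simp only [List.cons_prefix_cons, List.prefix_nil, List.nil_prefix, List.cons.injEq,
      List.cons_ne_nil, and_true, and_false, false_and, if_false, List.ne_nil_of_length_pos]
    split_ifs <;> simp_all [boranLookup]
  · -- [c1, c2]
    rw [show (min (([c1, c2] : List Char).length : Int) 3).toNat = 1+1 from rfl]
    rw [boranLookup_succ, show ((1:Nat):Int)+1 = ((2:Nat):Int) from rfl, slice_ofList]
    rw [show (1:Nat) = 0+1 from rfl, boranLookup_succ,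
      show ((0:Nat):Int)+1 = ((1:Nat):Int) from rfl, slice_ofList]
    rw [PySem.Dict.contains_eq_isSome_get?]
    simp only [List.take_succ_cons, List.take_nil, List.take_zero, get?_boranMap, boranFind,
      PySem.Str.startswith_eq, String.toList_ofList,
      show ("AH":String) = String.ofList ['A','H'] from rfl,
      show ("PH":String) = String.ofList ['P','H'] from rfl,
      show ("EC":String) = String.ofList ['E','C'] from rfl,
      show ("AL":String) = String.ofList ['A','L'] from rfl,
      show ("AR":String) = String.ofList ['A','R'] from rfl,
      show ("A":String) = String.ofList ['A'] from rfl,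
      show ("TB":String) = String.ofList ['T','B'] from rfl,
      show ("PHC":String) = String.ofList ['P','H','C'] from rfl,
      show ("DR":String) = String.ofList ['D','R'] from rfl,
      show ("LR":String) = String.ofList ['L','R'] from rfl,
      PySem.Chars.startswith_iff]
    simp [apply_ite Option.isSome, List.cons_prefix_cons]
    by_cases h1 : 'A' = c1 ∧ 'H' = c2
    · rcases h1 with ⟨rfl, rfl⟩; simp_all
    simp only [h1, if_false, false_or, false_and]
    by_cases h2 : 'P' = c1 ∧ 'H' = c2
    · rcases h2 with ⟨rfl, rfl⟩; simp_all
    simp only [h2, if_false, false_or, false_and]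
    by_cases h3 : 'E' = c1 ∧ 'C' = c2
    · rcases h3 with ⟨rfl, rfl⟩; simp_all
    simp only [h3, if_false, false_or, false_and]
    by_cases h4 : 'A' = c1 ∧ 'L' = c2
    · rcases h4 with ⟨rfl, rfl⟩; simp_all
    simp only [h4, if_false, false_or, false_and]
    by_cases h5 : 'A' = c1 ∧ 'R' = c2
    · rcases h5 with ⟨rfl, rfl⟩; simp_all
    simp only [h5, if_false, false_or, false_and]
    by_cases h6 : 'T' = c1 ∧ 'B' = c2
    · rcases h6 with ⟨rfl, rfl⟩; simp_all
    simp only [h6, if_false, false_or, false_and]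
    by_cases h7 : 'D' = c1 ∧ 'R' = c2
    · rcases h7 with ⟨rfl, rfl⟩; simp_all
    simp only [h7, if_false, false_or, false_and]
    by_cases h8 : 'L' = c1 ∧ 'R' = c2
    · rcases h8 with ⟨rfl, rfl⟩; simp_all
    simp only [h8, if_false, false_or, false_and]
    by_cases hA : 'A' = c1
    · rcases hA with ⟨rfl⟩; simp_all [boranLookup]
    · simp only [hA, if_false]; simp [boranLookup]
  · -- c1 :: c2 :: c3 :: rest
    rw [show (min (((c1::c2::c3::rest : List Char).length : Int)) 3).toNat = 3 by
      simp [List.length_cons]; omega]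
    rw [show (3:Nat) = 2+1 from rfl, boranLookup_succ,
      show ((2:Nat):Int)+1 = ((3:Nat):Int) from rfl, slice_ofList]
    rw [show (2:Nat) = 1+1 from rfl, boranLookup_succ,
      show ((1:Nat):Int)+1 = ((2:Nat):Int) from rfl, slice_ofList]
    rw [show (1:Nat) = 0+1 from rfl, boranLookup_succ,
      show ((0:Nat):Int)+1 = ((1:Nat):Int) from rfl, slice_ofList]
    rw [PySem.Dict.contains_eq_isSome_get?]
    simp only [List.take_succ_cons, List.take_nil, List.take_zero, get?_boranMap, boranFind,
      PySem.Str.startswith_eq, String.toList_ofList,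
      show ("AH":String) = String.ofList ['A','H'] from rfl,
      show ("PH":String) = String.ofList ['P','H'] from rfl,
      show ("EC":String) = String.ofList ['E','C'] from rfl,
      show ("AL":String) = String.ofList ['A','L'] from rfl,
      show ("AR":String) = String.ofList ['A','R'] from rfl,
      show ("A":String) = String.ofList ['A'] from rfl,
      show ("TB":String) = String.ofList ['T','B'] from rfl,
      show ("PHC":String) = String.ofList ['P','H','C'] from rfl,
      show ("DR":String) = String.ofList ['D','R'] from rfl,
      show ("LR":String) = String.ofList ['L','R'] from rfl,
      PySem.Chars.startswith_iff]
    simp [apply_ite Option.isSome, List.cons_prefix_cons]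
    by_cases h0 : 'P' = c1 ∧ 'H' = c2 ∧ 'C' = c3
    · rcases h0 with ⟨rfl, rfl, rfl⟩; simp; intro h; simp [h]
    simp only [h0, if_false, false_or, false_and]
    by_cases h1 : 'A' = c1 ∧ 'H' = c2
    · rcases h1 with ⟨rfl, rfl⟩; simp_all
    simp only [h1, if_false, false_or, false_and]
    by_cases h2 : 'P' = c1 ∧ 'H' = c2
    · rcases h2 with ⟨rfl, rfl⟩; simp_all
    simp only [h2, if_false, false_or, false_and]
    by_cases h3 : 'E' = c1 ∧ 'C' = c2
    · rcases h3 with ⟨rfl, rfl⟩; simp_all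
    simp only [h3, if_false, false_or, false_and]
    by_cases h4 : 'A' = c1 ∧ 'L' = c2
    · rcases h4 with ⟨rfl, rfl⟩; simp_all
    simp only [h4, if_false, false_or, false_and]
    by_cases h5 : 'A' = c1 ∧ 'R' = c2
    · rcases h5 with ⟨rfl, rfl⟩; simp_all
    simp only [h5, if_false, false_or, false_and]
    by_cases h6 : 'T' = c1 ∧ 'B' = c2
    · rcases h6 with ⟨rfl, rfl⟩; simp_all
    simp only [h6, if_false, false_or, false_and]
    by_cases h7 : 'D' = c1 ∧ 'R' = c2
    · rcases h7 with ⟨rfl, rfl⟩; simp_all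
    simp only [h7, if_false, false_or, false_and]
    by_cases h8 : 'L' = c1 ∧ 'R' = c2
    · rcases h8 with ⟨rfl, rfl⟩; simp_all
    simp only [h8, if_false, false_or, false_and]
    by_cases hA : 'A' = c1
    · rcases hA with ⟨rfl⟩; simp_all [boranLookup]
    · simp only [hA, if_false]
      rw [if_neg (fun hq => h0 ⟨hq.1, hq.2.1, hq.2.2.1⟩)]
      rfl

-- ===== VERDICT (by name: the statement is the Claim_ definition above) =====
theorem boran_parse_probe_region_py_spec : Claim_equal_boran_parse_probe_region_py := by
  intro prefix_ _
  exact boranCore_eq prefix_
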